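-- pv_equiv track=rewrite | github.com/ykzhang112233/GLEAM-X-pipeline | gleam_x/bin/calc_mean_pos.py | filter_files_from_obsid
-- ===== SOURCE A (Python) =====
-- from typing import Iterable, Union, Tuple
--
-- def filter_files_from_obsid(
--     files: Iterable[str], obsids: Iterable[int]
-- ) -> Iterable[str]:
--     """Given a set of file paths (assuming GLEAM-X directories) and a set of obsids, filter
--     out all paths that do not have an obsid beloning to the set of obsids.
--
--     Args:
--         files (Iterable[str]): List of files to filter out
--         obsids (Iterable[int]): List of acceptable obsids
--
--     Returns:
--         Iterable[str]: Path to files whose obsid is included in the obsid set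
--     """
--     filter_files = []
--     for f in files:
--         for obsid in obsids:
--             if str(obsid) in f:
--                 filter_files.append(f)
--                 break
--
--     return filter_files
-- ===== SOURCE B (Python) =====
-- def filter_files_from_obsid(files, obsids):
--     """Pattern-major sweep: dedupe the obsid strings once, then sweep each
--     pattern over a boolean mask that is or-ed in place; finally keep the
--     masked files. Same result as the file-major break loop."""
--     files = list(files)
--     matched = [False] * len(files)
--     for pattern in dict.fromkeys(str(o) for o in obsids):
--         matched = [m or pattern in f for m, f in zip(matched, files)]
--     return [f for f, m in zip(files, matched) if m]
-- ===== Notes on version B (the rewrite author's own statement) =====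
-- stated objective: alternative
-- what changed: Loop order is transposed: instead of scanning all obsids per file with a break, B dedupes the obsid strings once and sweeps each distinct pattern over a boolean mask of the files, then emits the masked files; duplicate obsids are tested only once.
import Mathlib
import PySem

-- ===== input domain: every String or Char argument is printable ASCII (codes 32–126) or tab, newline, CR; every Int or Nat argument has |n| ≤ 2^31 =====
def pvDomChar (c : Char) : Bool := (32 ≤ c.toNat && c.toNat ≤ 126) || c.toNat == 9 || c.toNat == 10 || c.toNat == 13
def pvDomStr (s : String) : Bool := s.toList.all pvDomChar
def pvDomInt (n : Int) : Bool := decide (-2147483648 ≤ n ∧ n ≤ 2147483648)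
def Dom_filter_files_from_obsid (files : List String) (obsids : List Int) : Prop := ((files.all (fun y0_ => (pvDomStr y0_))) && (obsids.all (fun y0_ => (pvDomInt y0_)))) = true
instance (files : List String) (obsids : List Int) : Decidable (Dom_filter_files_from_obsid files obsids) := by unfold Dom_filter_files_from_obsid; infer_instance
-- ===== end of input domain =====

-- B transposes the loops: it dedupes the obsid strings once and sweeps each distinct
-- pattern over a boolean mask of the files (alternative decomposition, same result).


-- ===== PORT A =====
-- 'for obsid in obsids: if str(obsid) in f: append; break'
def pvInnerA (f : String) (obsids : List Int) (acc : List String) : List String :=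
  match obsids with
  | [] => acc
  | o :: rest =>
      if PySem.Str.isIn (PySem.Int.toStr o) f then acc ++ [f] else pvInnerA f rest acc

def filter_files_from_obsid (files : List String) (obsids : List Int) : List String :=
  files.foldl (fun acc f => pvInnerA f obsids acc) []

-- ===== PORT B =====
def filter_files_from_obsid_alt (files : List String) (obsids : List Int) : List String :=
  let matched0 : List Bool := List.replicate files.length false
  let patterns : List String := PySem.List.dedup (obsids.map PySem.Int.toStr)
  let matched : List Bool := patterns.foldl
    (fun m pattern => (m.zip files).map (fun mf => mf.1 || PySem.Str.isIn pattern mf.2)) matched0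
  ((files.zip matched).filter (fun fm => fm.2)).map (fun fm => fm.1)

-- ===== PRECONDITION & SPEC =====
def Spec_filter_files_from_obsid (files : List String) (obsids : List Int) (out : List String) : Prop := out = filter_files_from_obsid_alt files obsids
instance (files : List String) (obsids : List Int) (out : List String) : Decidable (Spec_filter_files_from_obsid files obsids out) := by unfold Spec_filter_files_from_obsid; infer_instance

-- ===== CLAIM (what is proved, stated in full; the proofs are below) =====
def Claim_equal_filter_files_from_obsid : Prop := ∀ (files : List String) (obsids : List Int), Dom_filter_files_from_obsid files obsids → Spec_filter_files_from_obsid files obsids (filter_files_from_obsid files obsids)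

-- ===== LEMMAS AND PROOFS =====

-- the match test both programs decide for a file
def pvHit (obsids : List Int) (f : String) : Bool :=
  obsids.any (fun o => PySem.Str.isIn (PySem.Int.toStr o) f)

-- A's inner loop appends f exactly when some obsid string occurs in f
theorem pvInnerA_eq (f : String) (obsids : List Int) (acc : List String) :
    pvInnerA f obsids acc = if pvHit obsids f then acc ++ [f] else acc := by
  induction obsids with
  | nil => rfl
  | cons o rest ih =>
      simp only [pvInnerA, pvHit, List.any_cons]
      by_cases h : PySem.Str.isIn (PySem.Int.toStr o) f = true
      · simp only [h, Bool.true_or, reduceIte]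
      · rw [Bool.not_eq_true] at h
        simp only [h, Bool.false_or, ih, pvHit, Bool.false_eq_true, if_false]
        rfl

theorem portA_eq_filter (files : List String) (obsids : List Int) :
    filter_files_from_obsid files obsids = files.filter (pvHit obsids) := by
  unfold filter_files_from_obsid
  have h : (fun acc f => pvInnerA f obsids acc)
      = fun (acc : List String) f => if pvHit obsids f then acc ++ [f] else acc := by
    funext acc f; exact pvInnerA_eq f obsids acc
  rw [h, PySem.List.foldl_append_if_eq_filter]
  simp

-- one sweep of a pattern over the mask is a zipWith
theorem step_eq_zipWith (m : List Bool) (files : List String) (p : String) :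
    (m.zip files).map (fun mf => mf.1 || PySem.Str.isIn p mf.2)
      = List.zipWith (fun b f => b || PySem.Str.isIn p f) m files := by
  induction m generalizing files with
  | nil => simp
  | cons b bs ih => cases files with
    | nil => simp
    | cons f fs =>
        simp only [List.zip_cons_cons, List.map_cons, List.zipWith_cons_cons, ih]

-- composing zipWiths over the same right list
theorem zipWith_zipWith (g : Bool → String → Bool) (h : Bool → String → Bool)
    (m : List Bool) (files : List String) :
    List.zipWith g (List.zipWith h m files) files
      = List.zipWith (fun b f => g (h b f) f) m files := by
  induction m generalizing files with
  | nil => simp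
  | cons b bs ih => cases files with
    | nil => simp
    | cons f fs => simp only [List.zipWith_cons_cons, ih]

-- pointwise-equal combiners give equal zipWiths
theorem zipWith_ext (g : Bool → String → Bool) (h : Bool → String → Bool)
    (hgh : ∀ b f, g b f = h b f) (m : List Bool) (files : List String) :
    List.zipWith g m files = List.zipWith h m files := by
  induction m generalizing files with
  | nil => simp
  | cons b bs ih => cases files with
    | nil => simp
    | cons f fs => simp only [List.zipWith_cons_cons, ih, hgh]

-- a sweep that keeps every mask bit leaves an equal-length mask unchanged
theorem zipWith_fst (g : Bool → String → Bool) (hg : ∀ b f, g b f = b)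
    (m : List Bool) (files : List String) (hm : m.length = files.length) :
    List.zipWith g m files = m := by
  induction m generalizing files with
  | nil => simp
  | cons b bs ih => cases files with
    | nil => simp at hm
    | cons f fs =>
        simp only [List.zipWith_cons_cons, hg]
        rw [ih fs (by simpa using hm)]

-- the fold over the patterns accumulates an 'any' into the mask
theorem mask_fold (ps : List String) (m : List Bool) (files : List String)
    (hm : m.length = files.length) :
    ps.foldl (fun m pattern => (m.zip files).map (fun mf => mf.1 || PySem.Str.isIn pattern mf.2)) m
      = List.zipWith (fun b f => b || ps.any (fun p => PySem.Str.isIn p f)) m files := by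
  induction ps generalizing m with
  | nil =>
      simp only [List.foldl_nil, List.any_nil]
      exact (zipWith_fst _ (fun b f => Bool.or_false b) m files hm).symm
  | cons p ps ih =>
      rw [List.foldl_cons, step_eq_zipWith m files p, ih _ (by simp [hm]), zipWith_zipWith]
      exact zipWith_ext _ _ (fun b f => by simp [Bool.or_assoc]) m files

-- zipWith over a matching replicate is a map
theorem zipWith_replicate (g : Bool → String → Bool) (files : List String) :
    List.zipWith g (List.replicate files.length false) files = files.map (g false) := by
  induction files with
  | nil => simp
  | cons f fs ih => simp [List.replicate_succ, ih]

-- dedup of the string images decides the same 'any' as the obsid list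
theorem any_dedup (obsids : List Int) (f : String) :
    (PySem.List.dedup (obsids.map PySem.Int.toStr)).any (fun p => PySem.Str.isIn p f)
      = pvHit obsids f := by
  rw [Bool.eq_iff_iff]
  simp only [pvHit, List.any_eq_true, PySem.List.dedup_eq_ofList, PySem.Set.mem_ofList,
    List.mem_map]
  constructor
  · rintro ⟨p, ⟨o, ho, rfl⟩, hp⟩; exact ⟨o, ho, hp⟩
  · rintro ⟨o, ho, hp⟩; exact ⟨_, ⟨o, ho, rfl⟩, hp⟩

-- selecting by a mask computed from the files themselves is a filter
theorem zip_map_filter (c : String → Bool) (files : List String) :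
    ((files.zip (files.map c)).filter (fun fm => fm.2)).map (fun fm => fm.1)
      = files.filter c := by
  induction files with
  | nil => simp
  | cons f fs ih =>
      simp only [List.map_cons, List.zip_cons_cons, List.filter_cons]
      by_cases h : c f = true
      · simp [h, ih]
      · simp [h, ih]

theorem portB_eq_filter (files : List String) (obsids : List Int) :
    filter_files_from_obsid_alt files obsids = files.filter (pvHit obsids) := by
  dsimp only [filter_files_from_obsid_alt]
  rw [mask_fold _ _ _ (by simp), zipWith_replicate]
  have h : (fun f => false || (PySem.List.dedup (obsids.map PySem.Int.toStr)).any
        (fun p => PySem.Str.isIn p f)) = pvHit obsids := by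
    funext f; rw [Bool.false_or]; exact any_dedup obsids f
  rw [h]
  exact zip_map_filter (pvHit obsids) files

-- ===== VERDICT (by name: the statement is the Claim_ definition above) =====
theorem filter_files_from_obsid_spec : Claim_equal_filter_files_from_obsid := by
  intro files obsids _
  unfold Spec_filter_files_from_obsid
  rw [portA_eq_filter, portB_eq_filter]
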